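-- pv_equiv track=rewrite | github.com/Illumina/Gauchian | gauchian/depth_calling/haplotype.py | get_possible_hap_cns
-- ===== SOURCE A (Python) =====
-- def get_possible_hap_cns(full_cn, haplotype_count):
--     """
--     Given the total copy number (3 or 4) and the number of haplotypes,
--     Output all possible assignments of copy number per haplotype
--     Parameters:
--         full_cn (int): total cn of paralogs
--         haplotype_count (int): number of haplotypes
--     Returns:
--         possible_hap_cns(list of tuples): each item is a tuple of
--         size equal to haplotype_count, containing copy numbers of
--         each haplotype
--     """
--     possible_hap_cns = set()
--     if haplotype_count == 3:
--         for i in range(1, full_cn - haplotype_count + 2):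
--             for j in range(1, full_cn - haplotype_count + 2):
--                 for k in range(1, full_cn - haplotype_count + 2):
--                     if i+j+k == full_cn:
--                         possible_hap_cns.add((i, j, k))
--     if haplotype_count == 4:
--         for i in range(1, full_cn - haplotype_count + 2):
--             for j in range(1, full_cn - haplotype_count + 2):
--                 for k in range(1, full_cn - haplotype_count + 2):
--                     for l in range(1, full_cn - haplotype_count + 2):
--                         if i+j+k+l == full_cn:
--                             possible_hap_cns.add((i, j, k, l))
--     return possible_hap_cns
-- ===== SOURCE B (Python) =====
-- def get_possible_hap_cns(full_cn, haplotype_count):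
--     """Stars-and-bars: directly construct each ordered positive composition
--     of full_cn from increasing cut points, instead of filtering all tuples."""
--     possible_hap_cns = set()
--     if haplotype_count == 3:
--         for c1 in range(1, full_cn):
--             for c2 in range(c1 + 1, full_cn):
--                 possible_hap_cns.add((c1, c2 - c1, full_cn - c2))
--     if haplotype_count == 4:
--         for c1 in range(1, full_cn):
--             for c2 in range(c1 + 1, full_cn):
--                 for c3 in range(c2 + 1, full_cn):
--                     possible_hap_cns.add((c1, c2 - c1, c3 - c2, full_cn - c3))
--     return possible_hap_cns
-- ===== Notes on version B (the rewrite author's own statement) =====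
-- stated objective: faster
-- what changed: Replaces A's filtered enumeration of all k-tuples (testing i+j+k(+l)==full_cn) by a stars-and-bars construction that iterates over increasing cut points and emits each positive composition directly, so no sum test and one fewer nested loop.
import Mathlib
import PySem

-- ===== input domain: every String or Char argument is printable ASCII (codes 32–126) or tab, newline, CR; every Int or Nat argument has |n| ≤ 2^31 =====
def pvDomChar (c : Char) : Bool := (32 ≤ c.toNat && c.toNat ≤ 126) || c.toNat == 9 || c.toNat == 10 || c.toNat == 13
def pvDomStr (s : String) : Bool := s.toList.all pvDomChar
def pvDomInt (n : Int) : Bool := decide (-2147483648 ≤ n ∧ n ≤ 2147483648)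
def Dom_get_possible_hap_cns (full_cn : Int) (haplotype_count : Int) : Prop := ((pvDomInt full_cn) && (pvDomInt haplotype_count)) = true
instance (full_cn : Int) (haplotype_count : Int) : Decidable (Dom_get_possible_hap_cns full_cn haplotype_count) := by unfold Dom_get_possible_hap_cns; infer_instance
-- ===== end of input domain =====

-- B replaces A's filtered enumeration of all tuples by a direct stars-and-bars construction
-- of the positive compositions from increasing cut points (alternative algorithm, fewer iterations).
-- ===== PORT A =====
def get_possible_hap_cns (full_cn : Int) (haplotype_count : Int) : List (List Int) :=
  let s0 : PySem.Set (List Int) := PySem.Set.empty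
  let s1 : PySem.Set (List Int) :=
    if haplotype_count = 3 then
      (PySem.List.pyRange 1 (full_cn - haplotype_count + 2) 1).foldl (fun s i =>
        (PySem.List.pyRange 1 (full_cn - haplotype_count + 2) 1).foldl (fun s j =>
          (PySem.List.pyRange 1 (full_cn - haplotype_count + 2) 1).foldl (fun s k =>
            if i + j + k = full_cn then PySem.Set.add s [i, j, k] else s) s) s) s0
    else s0
  if haplotype_count = 4 then
    (PySem.List.pyRange 1 (full_cn - haplotype_count + 2) 1).foldl (fun s i =>
      (PySem.List.pyRange 1 (full_cn - haplotype_count + 2) 1).foldl (fun s j =>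
        (PySem.List.pyRange 1 (full_cn - haplotype_count + 2) 1).foldl (fun s k =>
          (PySem.List.pyRange 1 (full_cn - haplotype_count + 2) 1).foldl (fun s l =>
            if i + j + k + l = full_cn then PySem.Set.add s [i, j, k, l] else s) s) s) s) s1
  else s1

-- ===== PORT B =====
def get_possible_hap_cns_alt (full_cn : Int) (haplotype_count : Int) : List (List Int) :=
  let s0 : PySem.Set (List Int) := PySem.Set.empty
  let s1 : PySem.Set (List Int) :=
    if haplotype_count = 3 then
      (PySem.List.pyRange 1 full_cn 1).foldl (fun s c1 =>
        (PySem.List.pyRange (c1 + 1) full_cn 1).foldl (fun s c2 =>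
          PySem.Set.add s [c1, c2 - c1, full_cn - c2]) s) s0
    else s0
  if haplotype_count = 4 then
    (PySem.List.pyRange 1 full_cn 1).foldl (fun s c1 =>
      (PySem.List.pyRange (c1 + 1) full_cn 1).foldl (fun s c2 =>
        (PySem.List.pyRange (c2 + 1) full_cn 1).foldl (fun s c3 =>
          PySem.Set.add s [c1, c2 - c1, c3 - c2, full_cn - c3]) s) s) s1
  else s1

-- ===== PRECONDITION & SPEC =====
def Spec_get_possible_hap_cns (full_cn : Int) (haplotype_count : Int) (out : List (List Int)) : Prop := out = get_possible_hap_cns_alt full_cn haplotype_count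
instance (full_cn : Int) (haplotype_count : Int) (out : List (List Int)) : Decidable (Spec_get_possible_hap_cns full_cn haplotype_count out) := by unfold Spec_get_possible_hap_cns; infer_instance

-- ===== CLAIM (what is proved, stated in full; the proofs are below) =====
def Claim_equal_get_possible_hap_cns : Prop := ∀ (full_cn : Int) (haplotype_count : Int), Dom_get_possible_hap_cns full_cn haplotype_count → Spec_get_possible_hap_cns full_cn haplotype_count (get_possible_hap_cns full_cn haplotype_count)

-- ===== LEMMAS AND PROOFS =====

-- range shift: range(a+t, b+t) is range(a, b) translated by t
theorem pv_pyRange_shift (a b t : Int) :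
    PySem.List.pyRange (a + t) (b + t) 1 = (PySem.List.pyRange a b 1).map (· + t) := by
  rw [PySem.List.pyRange_one, PySem.List.pyRange_one, List.map_map]
  have : b + t - (a + t) = b - a := by ring
  rw [this]
  exact List.map_congr_left (fun k _ => by simp; ring)

-- filtering a unit-step range for one value keeps exactly that value if in range
theorem pv_filter_eq_pyRange (v : Int) : ∀ (a b : Int),
    (PySem.List.pyRange a b 1).filter (fun k => decide (k = v)) =
      if a ≤ v ∧ v < b then [v] else [] := by
  intro a b
  by_cases hab : b ≤ a
  · rw [PySem.List.pyRange_one_eq_nil hab]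
    simp; omega
  · push_neg at hab
    have hlt : (b - (a + 1)).toNat < (b - a).toNat := by omega
    rw [PySem.List.pyRange_one_cons hab, List.filter_cons, pv_filter_eq_pyRange v (a + 1) b]
    by_cases hv : a = v
    · subst hv
      rw [if_pos (by simp)]
      split_ifs with h1 h2 <;> first | rfl | omega
    · rw [if_neg (by simpa using hv)]
      split_ifs with h1 h2 <;> first | rfl | omega
termination_by a b => (b - a).toNat

-- filtering a unit-step range by '< t' truncates the range at t (when t ≤ b)
theorem pv_filter_lt_pyRange (t : Int) : ∀ (a b : Int), t ≤ b →
    (PySem.List.pyRange a b 1).filter (fun j => decide (j < t)) = PySem.List.pyRange a t 1 := by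
  intro a b ht
  by_cases hab : b ≤ a
  · rw [PySem.List.pyRange_one_eq_nil hab, PySem.List.pyRange_one_eq_nil (by omega)]
    rfl
  · push_neg at hab
    have hlt : (b - (a + 1)).toNat < (b - a).toNat := by omega
    rw [PySem.List.pyRange_one_cons hab, List.filter_cons,
        pv_filter_lt_pyRange t (a + 1) b ht]
    by_cases hat : a < t
    · rw [PySem.List.pyRange_one_cons hat]; simp [hat]
    · rw [PySem.List.pyRange_one_eq_nil (by omega), PySem.List.pyRange_one_eq_nil (by omega)]
      simp [hat]
termination_by a b => (b - a).toNat

-- identity folds and fold range changes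
theorem pv_foldl_id {β : Type} (f : β → Int → β) : ∀ (l : List Int) (s : β),
    (∀ x ∈ l, ∀ s, f s x = s) → l.foldl f s = s := by
  intro l
  induction l with
  | nil => intro s _; rfl
  | cons x xs ih =>
    intro s h
    rw [List.foldl_cons, h x (by simp), ih _ (fun y hy => h y (by simp [hy]))]

theorem pv_foldl_vanish {β : Type} (f : β → Int → β) (a b b' : Int) (s : β)
    (hb : b' ≤ b) (hv : ∀ x, b' ≤ x → ∀ s, f s x = s) :
    (PySem.List.pyRange a b 1).foldl f s = (PySem.List.pyRange a b' 1).foldl f s := by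
  by_cases hab : a ≤ b'
  · rw [PySem.List.pyRange_one_append a b' b hab hb, List.foldl_append]
    exact pv_foldl_id f _ _ (fun x hx => hv x (PySem.List.mem_pyRange_one.1 hx).1)
  · push_neg at hab
    rw [PySem.List.pyRange_one_eq_nil (le_of_lt hab)]
    exact pv_foldl_id f _ _
      (fun x hx => hv x (le_trans (le_of_lt hab) (PySem.List.mem_pyRange_one.1 hx).1))

theorem pv_foldl_bounds {β : Type} (f : β → Int → β) (a b b' : Int) (s : β)
    (hv : ∀ x, b ≤ x → ∀ s, f s x = s) (hv' : ∀ x, b' ≤ x → ∀ s, f s x = s) :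
    (PySem.List.pyRange a b 1).foldl f s = (PySem.List.pyRange a b' 1).foldl f s := by
  rcases le_total b' b with hle | hle
  · exact pv_foldl_vanish f a b b' s hle hv'
  · exact (pv_foldl_vanish f a b' b s hle hv).symm

-- the common canonical loops both ports reduce to
def pvG3 (n i : Int) (s : PySem.Set (List Int)) : PySem.Set (List Int) :=
  (PySem.List.pyRange 1 (n - i) 1).foldl (fun s j => PySem.Set.add s [i, j, n - i - j]) s

def pvG4 (n i j : Int) (s : PySem.Set (List Int)) : PySem.Set (List Int) :=
  (PySem.List.pyRange 1 (n - i - j) 1).foldl (fun s k => PySem.Set.add s [i, j, k, n - i - j - k]) s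

def pvH4 (n i : Int) (s : PySem.Set (List Int)) : PySem.Set (List Int) :=
  (PySem.List.pyRange 1 (n - i) 1).foldl (fun s j => pvG4 n i j s) s

theorem pvG3_id (n x : Int) (hx : n - 1 ≤ x) (s : PySem.Set (List Int)) : pvG3 n x s = s := by
  unfold pvG3; rw [PySem.List.pyRange_one_eq_nil (by omega)]; rfl

theorem pvG4_id (n x y : Int) (hxy : n - 1 ≤ x + y) (s : PySem.Set (List Int)) :
    pvG4 n x y s = s := by
  unfold pvG4; rw [PySem.List.pyRange_one_eq_nil (by omega)]; rfl

theorem pvH4_id (n x : Int) (hx : n - 2 ≤ x) (s : PySem.Set (List Int)) : pvH4 n x s = s := by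
  unfold pvH4
  exact pv_foldl_id _ _ _ (fun j hj s => by
    have hj' := PySem.List.mem_pyRange_one.1 hj
    exact pvG4_id n x j (by omega) s)

-- A, 3 haplotypes: innermost filtered loop adds the one completing value when legal
theorem pv_A3_inner (n i j : Int) (s : PySem.Set (List Int)) :
    (PySem.List.pyRange 1 (n - 1) 1).foldl
        (fun s k => if i + j + k = n then PySem.Set.add s [i, j, k] else s) s =
      if 1 ≤ n - i - j ∧ n - i - j < n - 1 then PySem.Set.add s [i, j, n - i - j] else s := by
  rw [PySem.List.foldl_ite_eq_foldl_filter,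
      List.filter_congr (l := PySem.List.pyRange 1 (n - 1) 1)
        (q := fun k => decide (k = n - i - j)) (fun k _ => decide_eq_decide.mpr (by omega)),
      pv_filter_eq_pyRange]
  split_ifs with h
  · rfl
  · rfl

theorem pv_A3_mid (n i : Int) (hi : 1 ≤ i) (s : PySem.Set (List Int)) :
    (PySem.List.pyRange 1 (n - 1) 1).foldl
        (fun s j => (PySem.List.pyRange 1 (n - 1) 1).foldl
          (fun s k => if i + j + k = n then PySem.Set.add s [i, j, k] else s) s) s =
      pvG3 n i s := by
  have h1 : (PySem.List.pyRange 1 (n - 1) 1).foldl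
        (fun s j => (PySem.List.pyRange 1 (n - 1) 1).foldl
          (fun s k => if i + j + k = n then PySem.Set.add s [i, j, k] else s) s) s =
      (PySem.List.pyRange 1 (n - 1) 1).foldl
        (fun s j => if j < n - i then PySem.Set.add s [i, j, n - i - j] else s) s :=
    PySem.List.foldl_congr_mem _ _ _ _ (fun acc j hj => by
      have hj' := PySem.List.mem_pyRange_one.1 hj
      rw [pv_A3_inner]
      split_ifs with h1 h2 <;> first | rfl | omega)
  rw [h1, PySem.List.foldl_ite_eq_foldl_filter,
      pv_filter_lt_pyRange (n - i) 1 (n - 1) (by omega)]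
  rfl

-- B, 3 haplotypes: the cut-point loop is the same canonical loop after the shift c2 = j + c1
theorem pv_B3_inner (n c1 : Int) (s : PySem.Set (List Int)) :
    (PySem.List.pyRange (c1 + 1) n 1).foldl
        (fun s c2 => PySem.Set.add s [c1, c2 - c1, n - c2]) s = pvG3 n c1 s := by
  have hsh : PySem.List.pyRange (c1 + 1) n 1 =
      (PySem.List.pyRange 1 (n - c1) 1).map (· + c1) := by
    have h := pv_pyRange_shift 1 (n - c1) c1
    rw [show (1 + c1 : Int) = c1 + 1 by ring, show (n - c1 + c1 : Int) = n by ring] at h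
    exact h
  rw [hsh, List.foldl_map]
  unfold pvG3
  exact PySem.List.foldl_congr_mem _ _ _ _ (fun acc j _ => by
    rw [show (j + c1 - c1 : Int) = j by ring, show (n - (j + c1) : Int) = n - c1 - j by ring])

-- A, 4 haplotypes
theorem pv_A4_inner (n i j k : Int) (s : PySem.Set (List Int)) :
    (PySem.List.pyRange 1 (n - 2) 1).foldl
        (fun s l => if i + j + k + l = n then PySem.Set.add s [i, j, k, l] else s) s =
      if 1 ≤ n - i - j - k ∧ n - i - j - k < n - 2 then
        PySem.Set.add s [i, j, k, n - i - j - k] else s := by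
  rw [PySem.List.foldl_ite_eq_foldl_filter,
      List.filter_congr (l := PySem.List.pyRange 1 (n - 2) 1)
        (q := fun l => decide (l = n - i - j - k)) (fun l _ => decide_eq_decide.mpr (by omega)),
      pv_filter_eq_pyRange]
  split_ifs with h
  · rfl
  · rfl

theorem pv_A4_klevel (n i j : Int) (hij : 2 ≤ i + j) (s : PySem.Set (List Int)) :
    (PySem.List.pyRange 1 (n - 2) 1).foldl
        (fun s k => (PySem.List.pyRange 1 (n - 2) 1).foldl
          (fun s l => if i + j + k + l = n then PySem.Set.add s [i, j, k, l] else s) s) s =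
      pvG4 n i j s := by
  have h1 : (PySem.List.pyRange 1 (n - 2) 1).foldl
        (fun s k => (PySem.List.pyRange 1 (n - 2) 1).foldl
          (fun s l => if i + j + k + l = n then PySem.Set.add s [i, j, k, l] else s) s) s =
      (PySem.List.pyRange 1 (n - 2) 1).foldl
        (fun s k => if k < n - i - j then PySem.Set.add s [i, j, k, n - i - j - k] else s) s :=
    PySem.List.foldl_congr_mem _ _ _ _ (fun acc k hk => by
      have hk' := PySem.List.mem_pyRange_one.1 hk
      rw [pv_A4_inner]
      split_ifs with h1 h2 <;> first | rfl | omega)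
  rw [h1, PySem.List.foldl_ite_eq_foldl_filter,
      pv_filter_lt_pyRange (n - i - j) 1 (n - 2) (by omega)]
  rfl

theorem pv_A4_jlevel (n i : Int) (hi : 1 ≤ i) (s : PySem.Set (List Int)) :
    (PySem.List.pyRange 1 (n - 2) 1).foldl
        (fun s j => (PySem.List.pyRange 1 (n - 2) 1).foldl
          (fun s k => (PySem.List.pyRange 1 (n - 2) 1).foldl
            (fun s l => if i + j + k + l = n then PySem.Set.add s [i, j, k, l] else s) s) s) s =
      pvH4 n i s := by
  have h1 : (PySem.List.pyRange 1 (n - 2) 1).foldl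
        (fun s j => (PySem.List.pyRange 1 (n - 2) 1).foldl
          (fun s k => (PySem.List.pyRange 1 (n - 2) 1).foldl
            (fun s l => if i + j + k + l = n then PySem.Set.add s [i, j, k, l] else s) s) s) s =
      (PySem.List.pyRange 1 (n - 2) 1).foldl (fun s j => pvG4 n i j s) s :=
    PySem.List.foldl_congr_mem _ _ _ _ (fun acc j hj => pv_A4_klevel n i j (by
      have := PySem.List.mem_pyRange_one.1 hj; omega) acc)
  rw [h1]
  unfold pvH4
  exact pv_foldl_bounds _ 1 (n - 2) (n - i) s
    (fun x hx s => pvG4_id n i x (by omega) s)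
    (fun x hx s => pvG4_id n i x (by omega) s)

-- B, 4 haplotypes
theorem pv_B4_inner (n c1 j : Int) (s : PySem.Set (List Int)) :
    (PySem.List.pyRange (j + c1 + 1) n 1).foldl
        (fun s c3 => PySem.Set.add s [c1, j + c1 - c1, c3 - (j + c1), n - c3]) s =
      pvG4 n c1 j s := by
  have hsh : PySem.List.pyRange (j + c1 + 1) n 1 =
      (PySem.List.pyRange 1 (n - c1 - j) 1).map (· + (j + c1)) := by
    have h := pv_pyRange_shift 1 (n - c1 - j) (j + c1)
    rw [show (1 + (j + c1) : Int) = j + c1 + 1 by ring,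
        show (n - c1 - j + (j + c1) : Int) = n by ring] at h
    exact h
  rw [hsh, List.foldl_map]
  unfold pvG4
  exact PySem.List.foldl_congr_mem _ _ _ _ (fun acc k _ => by
    rw [show (j + c1 - c1 : Int) = j by ring, show (k + (j + c1) - (j + c1) : Int) = k by ring,
        show (n - (k + (j + c1)) : Int) = n - c1 - j - k by ring])

theorem pv_B4_mid (n c1 : Int) (s : PySem.Set (List Int)) :
    (PySem.List.pyRange (c1 + 1) n 1).foldl
        (fun s c2 => (PySem.List.pyRange (c2 + 1) n 1).foldl
          (fun s c3 => PySem.Set.add s [c1, c2 - c1, c3 - c2, n - c3]) s) s = pvH4 n c1 s := by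
  have hsh : PySem.List.pyRange (c1 + 1) n 1 =
      (PySem.List.pyRange 1 (n - c1) 1).map (· + c1) := by
    have h := pv_pyRange_shift 1 (n - c1) c1
    rw [show (1 + c1 : Int) = c1 + 1 by ring, show (n - c1 + c1 : Int) = n by ring] at h
    exact h
  rw [hsh, List.foldl_map]
  unfold pvH4
  exact PySem.List.foldl_congr_mem _ _ _ _ (fun acc j _ => pv_B4_inner n c1 j acc)

theorem pv_case3 (n : Int) :
    get_possible_hap_cns n 3 = get_possible_hap_cns_alt n 3 := by
  unfold get_possible_hap_cns get_possible_hap_cns_alt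
  norm_num
  rw [show (n - 3 + 2 : Int) = n - 1 by ring]
  have hA : (PySem.List.pyRange 1 (n - 1) 1).foldl
        (fun s i => (PySem.List.pyRange 1 (n - 1) 1).foldl
          (fun s j => (PySem.List.pyRange 1 (n - 1) 1).foldl
            (fun s k => if i + j + k = n then PySem.Set.add s [i, j, k] else s) s) s)
        ([] : PySem.Set (List Int)) =
      (PySem.List.pyRange 1 (n - 1) 1).foldl (fun s i => pvG3 n i s) ([] : PySem.Set (List Int)) :=
    PySem.List.foldl_congr_mem _ _ _ _
      (fun acc i hi => pv_A3_mid n i (PySem.List.mem_pyRange_one.1 hi).1 acc)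
  have hB : (PySem.List.pyRange 1 n 1).foldl
        (fun s c1 => (PySem.List.pyRange (c1 + 1) n 1).foldl
          (fun s c2 => PySem.Set.add s [c1, c2 - c1, n - c2]) s) ([] : PySem.Set (List Int)) =
      (PySem.List.pyRange 1 n 1).foldl (fun s c1 => pvG3 n c1 s) ([] : PySem.Set (List Int)) :=
    PySem.List.foldl_congr_mem _ _ _ _ (fun acc c1 _ => pv_B3_inner n c1 acc)
  rw [hA, hB]
  exact pv_foldl_bounds _ 1 (n - 1) n ([] : PySem.Set (List Int))
    (fun x hx s => pvG3_id n x (by omega) s)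
    (fun x hx s => pvG3_id n x (by omega) s)

theorem pv_case4 (n : Int) :
    get_possible_hap_cns n 4 = get_possible_hap_cns_alt n 4 := by
  unfold get_possible_hap_cns get_possible_hap_cns_alt
  norm_num
  rw [show (n - 4 + 2 : Int) = n - 2 by ring]
  have hA : (PySem.List.pyRange 1 (n - 2) 1).foldl
        (fun s i => (PySem.List.pyRange 1 (n - 2) 1).foldl
          (fun s j => (PySem.List.pyRange 1 (n - 2) 1).foldl
            (fun s k => (PySem.List.pyRange 1 (n - 2) 1).foldl
              (fun s l => if i + j + k + l = n then PySem.Set.add s [i, j, k, l] else s) s) s) s)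
        ([] : PySem.Set (List Int)) =
      (PySem.List.pyRange 1 (n - 2) 1).foldl (fun s i => pvH4 n i s) ([] : PySem.Set (List Int)) :=
    PySem.List.foldl_congr_mem _ _ _ _
      (fun acc i hi => pv_A4_jlevel n i (PySem.List.mem_pyRange_one.1 hi).1 acc)
  have hB : (PySem.List.pyRange 1 n 1).foldl
        (fun s c1 => (PySem.List.pyRange (c1 + 1) n 1).foldl
          (fun s c2 => (PySem.List.pyRange (c2 + 1) n 1).foldl
            (fun s c3 => PySem.Set.add s [c1, c2 - c1, c3 - c2, n - c3]) s) s) ([] : PySem.Set (List Int)) =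
      (PySem.List.pyRange 1 n 1).foldl (fun s c1 => pvH4 n c1 s) ([] : PySem.Set (List Int)) :=
    PySem.List.foldl_congr_mem _ _ _ _ (fun acc c1 _ => pv_B4_mid n c1 acc)
  rw [hA, hB]
  exact pv_foldl_bounds _ 1 (n - 2) n ([] : PySem.Set (List Int))
    (fun x hx s => pvH4_id n x (by omega) s)
    (fun x hx s => pvH4_id n x (by omega) s)

-- ===== VERDICT (by name: the statement is the Claim_ definition above) =====
theorem get_possible_hap_cns_spec : Claim_equal_get_possible_hap_cns := by
  intro n hc _
  unfold Spec_get_possible_hap_cns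
  by_cases h3 : hc = 3
  · subst h3; exact pv_case3 n
  · by_cases h4 : hc = 4
    · subst h4; exact pv_case4 n
    · unfold get_possible_hap_cns get_possible_hap_cns_alt
      simp [h3, h4]
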